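-- pv_equiv track=rewrite | github.com/none-ascetic/sophie-train-tracker | fare_history.py | _observations_by_travel
-- ===== SOURCE A (Python) =====
-- def _observations_by_travel(history: list[dict]) -> dict[str, list[dict]]:
--     out: dict[str, list[dict]] = {}
--     for r in history:
--         td = r.get("travel_date")
--         if td:
--             out.setdefault(td, []).append(r)
--     for td in out:
--         out[td].sort(key=lambda r: r.get("observed_at") or "")
--     return out
-- ===== SOURCE B (Python) =====
-- def _observations_by_travel(history: list[dict]) -> dict[str, list[dict]]:
--     kept = [r for r in history if r.get("travel_date")]
--     out = {r["travel_date"]: [] for r in kept}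
--     for r in sorted(kept, key=lambda r: r.get("observed_at") or ""):
--         out[r["travel_date"]].append(r)
--     return out
-- ===== Notes on version B (the rewrite author's own statement) =====
-- stated objective: alternative
-- what changed: Instead of grouping first and then sorting each bucket, B filters the truthy-travel_date records, pre-seeds the output keys in first-occurrence order, performs ONE global stable sort by observed_at, and distributes the sorted records into their buckets in a single pass (stability makes each bucket come out in A's order).
import Mathlib
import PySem

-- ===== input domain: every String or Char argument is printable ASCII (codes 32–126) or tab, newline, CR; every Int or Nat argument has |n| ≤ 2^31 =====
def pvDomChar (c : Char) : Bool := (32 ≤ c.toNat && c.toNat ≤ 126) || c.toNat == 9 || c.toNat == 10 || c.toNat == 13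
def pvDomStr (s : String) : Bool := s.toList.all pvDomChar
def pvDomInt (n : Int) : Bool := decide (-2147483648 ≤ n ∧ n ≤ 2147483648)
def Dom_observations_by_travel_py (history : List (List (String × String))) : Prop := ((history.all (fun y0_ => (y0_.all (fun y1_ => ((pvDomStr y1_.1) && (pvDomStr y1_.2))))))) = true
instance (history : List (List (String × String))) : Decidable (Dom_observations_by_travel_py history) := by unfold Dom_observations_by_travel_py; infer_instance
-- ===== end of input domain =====

-- B replaces "group, then sort each bucket" by "pre-seed keys, one global stable sort, distribute in one pass" (alternative decomposition, same cost).

-- r.get("travel_date") is truthy iff the first-match lookup yields a nonempty string; `getD "" ≠ ""` captures both None and "".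
def pvTd (r : List (String × String)) : String := (PySem.Dict.mk r).getD "travel_date" ""
-- r.get("observed_at") or "" : None and "" both become ""
def pvOb (r : List (String × String)) : String := (PySem.Dict.mk r).getD "observed_at" ""

-- ===== PORT A =====
def observations_by_travel_py (history : List (List (String × String))) : List (String × List (List (String × String))) :=
  -- for r in history: td = r.get("travel_date"); if td: out.setdefault(td, []).append(r)
  let out : PySem.Dict String (List (List (String × String))) :=
    history.foldl (fun d r => if pvTd r ≠ "" then d.modify (pvTd r) [] (fun l => l ++ [r]) else d) PySem.Dict.empty
  -- for td in out: out[td].sort(key=...) — each bucket sorted in place, key order unchanged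
  (out.items.map (fun kv => (kv.1, PySem.List.sorted kv.2 pvOb false)))

-- ===== PORT B =====
def observations_by_travel_py_alt (history : List (List (String × String))) : List (String × List (List (String × String))) :=
  -- kept = [r for r in history if r.get("travel_date")]
  let kept := history.filter (fun r => pvTd r ≠ "")
  -- out = {r["travel_date"]: [] for r in kept}   (r["travel_date"] exists & is nonempty for r in kept, so getD is exact)
  let init : PySem.Dict String (List (List (String × String))) :=
    kept.foldl (fun d r => d.insert (pvTd r) []) PySem.Dict.empty
  -- for r in sorted(kept, key=...): out[r["travel_date"]].append(r)   (key always present in init)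
  let out := (PySem.List.sorted kept pvOb false).foldl (fun d r => d.modify (pvTd r) [] (fun l => l ++ [r])) init
  out.items

-- ===== PRECONDITION & SPEC =====
def Spec_observations_by_travel_py (history : List (List (String × String))) (out : List (String × List (List (String × String)))) : Prop := out = observations_by_travel_py_alt history
instance (history : List (List (String × String))) (out : List (String × List (List (String × String)))) : Decidable (Spec_observations_by_travel_py history out) := by unfold Spec_observations_by_travel_py; infer_instance

-- ===== CLAIM (what is proved, stated in full; the proofs are below) =====
def Claim_equal_observations_by_travel_py : Prop := ∀ (history : List (List (String × String))), Dom_observations_by_travel_py history → Spec_observations_by_travel_py history (observations_by_travel_py history)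

-- ===== LEMMAS AND PROOFS =====

-- x goes in front when it is "before" every element (insertion sort step)
theorem pv_insertBy_forall_before {α : Type} (bf : α → α → Bool) (x : α) (zs : List α)
    (h : ∀ z ∈ zs, bf x z = true) : PySem.List.insertBy bf x zs = x :: zs := by
  cases zs with
  | nil => rfl
  | cons z zs =>
      simp [PySem.List.insertBy, h z (by simp)]

-- insertBy preserves sortedness
theorem pv_pairwise_insertBy {α κ : Type} [LinearOrder κ] (key : α → κ) (x : α) (ys : List α)
    (h : ys.Pairwise (fun a b => key a ≤ key b)) :
    (PySem.List.insertBy (fun a b => decide (key a < key b)) x ys).Pairwise (fun a b => key a ≤ key b) := by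
  induction ys with
  | nil => simp [PySem.List.insertBy]
  | cons y ys ih =>
      rcases List.pairwise_cons.mp h with ⟨hy, ht⟩
      by_cases hb : key x < key y
      · simp only [PySem.List.insertBy, hb, decide_true]
        exact List.pairwise_cons.mpr ⟨by
          intro z hz
          rcases List.mem_cons.mp hz with rfl | hz
          · exact le_of_lt hb
          · exact le_trans (le_of_lt hb) (hy z hz), h⟩
      · simp only [PySem.List.insertBy, hb, decide_false]
        refine List.pairwise_cons.mpr ⟨?_, ih ht⟩
        intro z hz
        rcases (PySem.List.mem_insertBy _ _ _ _).mp hz with rfl | hz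
        · exact le_of_not_gt hb
        · exact hy z hz

-- filtering commutes with one insertion step into a sorted list
theorem pv_filter_insertBy {α κ : Type} [LinearOrder κ] (key : α → κ) (p : α → Bool) (x : α) (ys : List α)
    (h : ys.Pairwise (fun a b => key a ≤ key b)) :
    (PySem.List.insertBy (fun a b => decide (key a < key b)) x ys).filter p =
      if p x then PySem.List.insertBy (fun a b => decide (key a < key b)) x (ys.filter p) else ys.filter p := by
  induction ys with
  | nil => cases hpx : p x <;> simp [PySem.List.insertBy, hpx]
  | cons y ys ih =>
      rcases List.pairwise_cons.mp h with ⟨hy, ht⟩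
      by_cases hb : key x < key y
      · simp only [PySem.List.insertBy, hb, decide_true]
        have hall : ∀ z ∈ (y :: ys).filter p, (fun a b => decide (key a < key b)) x z = true := by
          intro z hz
          have hz' := List.mem_of_mem_filter hz
          rcases List.mem_cons.mp hz' with rfl | hz'
          · simpa using hb
          · simpa using lt_of_lt_of_le hb (hy z hz')
        rw [pv_insertBy_forall_before _ x ((y :: ys).filter p) hall]
        cases hpx : p x <;> simp [hpx, List.filter]
      · simp only [PySem.List.insertBy, hb, decide_false]
        cases hpy : p y
        · cases hpx : p x <;>
            simp [hpy, hpx, ih ht]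
        · cases hpx : p x <;>
            simp [hpy, hpx, ih ht, PySem.List.insertBy, hb]

-- filtering commutes with the whole insertion-sort fold
theorem pv_filter_foldl_insertBy {α κ : Type} [LinearOrder κ] (key : α → κ) (p : α → Bool) (xs : List α) :
    ∀ acc : List α, acc.Pairwise (fun a b => key a ≤ key b) →
    (xs.foldl (fun acc x => PySem.List.insertBy (fun a b => decide (key a < key b)) x acc) acc).filter p =
      (xs.filter p).foldl (fun acc x => PySem.List.insertBy (fun a b => decide (key a < key b)) x acc) (acc.filter p) := by
  induction xs with
  | nil => intro acc _; rfl
  | cons x xs ih =>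
      intro acc hacc
      have hstep := pv_filter_insertBy key p x acc hacc
      have hp := pv_pairwise_insertBy key x acc hacc
      cases hpx : p x
      · simp only [List.foldl_cons, List.filter_cons, hpx]
        rw [ih _ hp, hstep]
        simp [hpx]
      · simp only [List.foldl_cons, List.filter_cons, hpx]
        rw [ih _ hp, hstep]
        simp [hpx]

-- stability: the filtered part of a stable sort is the stable sort of the filtered list
theorem pv_sorted_filter {α κ : Type} [LinearOrder κ] (key : α → κ) (p : α → Bool) (xs : List α) :
    (PySem.List.sorted xs key false).filter p = PySem.List.sorted (xs.filter p) key false := by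
  rw [PySem.List.sorted_eq_foldl_insertBy, PySem.List.sorted_eq_foldl_insertBy]
  simpa using pv_filter_foldl_insertBy key p xs [] (by simp)

-- an insert-[] loop never makes a bucket nonempty
theorem pv_getD_foldl_insert_nil {α : Type} (f : α → String) (l : List α) :
    ∀ (d : PySem.Dict String (List (List (String × String)))),
      (∀ k, d.getD k [] = []) → ∀ k, (l.foldl (fun d r => d.insert (f r) []) d).getD k [] = [] := by
  induction l with
  | nil => intro d h k; exact h k
  | cons x l ih =>
      intro d h k
      simp only [List.foldl_cons]
      refine ih _ ?_ k
      intro k'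
      rw [PySem.Dict.getD_insert]
      split_ifs with hk
      · rfl
      · exact h k'

-- bucket contents of the modify-append grouping loop
theorem pv_getD_group (l : List (List (String × String))) (d : PySem.Dict String (List (List (String × String)))) (k : String) :
    (l.foldl (fun d r => d.modify (pvTd r) [] (fun b => b ++ [r])) d).getD k [] =
      d.getD k [] ++ l.filter (fun r => pvTd r == k) := by
  have h1 : l.foldl (fun d r => d.modify (pvTd r) [] (fun b => b ++ [r])) d =
      (l.map (fun r => (pvTd r, r))).foldl (fun d p => d.modify p.1 [] (fun b => b ++ [p.2])) d := by
    rw [List.foldl_map]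
  rw [h1, PySem.Dict.getD_foldl_modify_append]
  congr 1
  rw [List.filter_map]
  simp [Function.comp_def]

theorem observations_by_travel_py_spec : Claim_equal_observations_by_travel_py := by
  unfold Claim_equal_observations_by_travel_py
  intro history _
  unfold Spec_observations_by_travel_py observations_by_travel_py observations_by_travel_py_alt
  simp only []
  set kept := history.filter (fun r => pvTd r ≠ "") with hkept
  -- A's loop skips exactly the records the filter drops
  rw [PySem.List.foldl_ite_eq_foldl_filter]
  set dA := kept.foldl (fun d r => d.modify (pvTd r) [] (fun b => b ++ [r])) PySem.Dict.empty with hdA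
  set init := kept.foldl (fun d r => d.insert (pvTd r) []) PySem.Dict.empty with hinit
  set out := (PySem.List.sorted kept pvOb false).foldl (fun d r => d.modify (pvTd r) [] (fun b => b ++ [r])) init with hout
  have hKA : dA.keys = PySem.Set.ofList (kept.map pvTd) := by
    rw [hdA, PySem.Dict.keys_foldl_modify_key]
    simp [PySem.Set.update_nil_left]
  have hKI : init.keys = PySem.Set.ofList (kept.map pvTd) := by
    rw [hinit, PySem.Dict.keys_foldl_insert_key]
    simp [PySem.Set.update_nil_left]
  have hKO : out.keys = PySem.Set.ofList (kept.map pvTd) := by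
    rw [hout, PySem.Dict.keys_foldl_modify_key, hKI, PySem.Set.update_eq_append_filter]
    have : ∀ x ∈ PySem.Set.ofList ((PySem.List.sorted kept pvOb false).map pvTd),
        PySem.Set.contains (PySem.Set.ofList (kept.map pvTd)) x = true := by
      intro x hx
      rw [PySem.Set.contains_iff]
      have := (PySem.Set.mem_ofList _ _).mp hx
      rcases List.mem_map.mp this with ⟨r, hr, rfl⟩
      exact (PySem.Set.mem_ofList _ _).mpr (List.mem_map.mpr ⟨r, (PySem.List.mem_sorted _ _ _ _).mp hr, rfl⟩)
    rw [List.filter_eq_nil_iff.mpr (by intro x hx; simp only [this x hx, Bool.not_true]; simp), List.append_nil]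
  have hndA : dA.keys.Nodup := by rw [hKA]; exact PySem.Set.nodup_ofList _
  have hndO : out.keys.Nodup := by rw [hKO]; exact PySem.Set.nodup_ofList _
  have hgI : ∀ k, init.getD k [] = [] := by
    intro k
    exact pv_getD_foldl_insert_nil pvTd kept PySem.Dict.empty (fun k => by simp [PySem.Dict.getD_empty]) k
  have hbucket : ∀ k, out.getD k [] = PySem.List.sorted (dA.getD k []) pvOb false := by
    intro k
    rw [hout, pv_getD_group, hgI k, List.nil_append, hdA, pv_getD_group,
      pv_sorted_filter pvOb (fun r => pvTd r == k) kept]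
    simp [PySem.Dict.getD_empty]
  rw [PySem.Dict.items_eq_map_keys dA hndA [], PySem.Dict.items_eq_map_keys out hndO [],
    hKA, hKO, List.map_map]
  refine List.map_congr_left ?_
  intro k _
  simp [hbucket k]
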